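-- pv_equiv track=rewrite | github.com/stoa-platform/stoa | control-plane-api/src/services/uac_transformer.py | _title_to_name
-- ===== SOURCE A (Python) =====
-- def _title_to_name(title: str) -> str:
--     """Convert an OpenAPI title to a kebab-case contract name.
--
--     E.g., "Payment Service API" -> "payment-service-api"
--     """
--     name = title.lower().strip()
--     # Replace non-alphanumeric chars with hyphens
--     result = []
--     for ch in name:
--         if ch.isalnum():
--             result.append(ch)
--         elif result and result[-1] != "-":
--             result.append("-")
--
--     cleaned = "".join(result).strip("-")
--     # Ensure at least 2 chars for regex pattern
--     if len(cleaned) < 2: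
--         cleaned = cleaned + "-api" if cleaned else "unnamed-api"
--     return cleaned
-- ===== SOURCE B (Python) =====
-- def _title_to_name(title: str) -> str:
--     """Kebab-case contract name: extract maximal alphanumeric runs, join with '-'."""
--     name = title.lower()
--     runs = []
--     i, n = 0, len(name)
--     while i < n:
--         if name[i].isalnum():
--             j = i
--             while j < n and name[j].isalnum():
--                 j += 1
--             runs.append(name[i:j])
--             i = j
--         else:
--             i += 1
--     cleaned = "-".join(runs)
--     if len(cleaned) < 2:
--         cleaned = cleaned + "-api" if cleaned else "unnamed-api"
--     return cleaned
-- ===== Notes on version B (the rewrite author's own statement) =====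
-- stated objective: alternative
-- what changed: Replaces A's stateful character-by-character loop (append char / conditionally append '-' depending on the last emitted char, then strip hyphens) with a run-extraction pass that collects the maximal alphanumeric runs and joins them with '-', needing no strip and no post-cleanup.
import Mathlib
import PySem

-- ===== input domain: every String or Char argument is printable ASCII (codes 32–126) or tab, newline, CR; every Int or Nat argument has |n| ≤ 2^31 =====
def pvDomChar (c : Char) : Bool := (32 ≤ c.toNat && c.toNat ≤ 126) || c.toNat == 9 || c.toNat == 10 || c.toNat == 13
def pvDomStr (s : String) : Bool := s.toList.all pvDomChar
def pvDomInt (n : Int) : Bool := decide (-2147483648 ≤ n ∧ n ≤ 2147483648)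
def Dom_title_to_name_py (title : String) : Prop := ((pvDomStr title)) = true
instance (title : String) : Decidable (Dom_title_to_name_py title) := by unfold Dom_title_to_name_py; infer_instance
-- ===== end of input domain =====

-- B replaces A's stateful char loop with maximal-alnum-run extraction joined by '-' (objective: alternative decomposition, same cost).

-- ===== PORT A =====
def title_to_name_py (title : String) : String :=
  let name := PySem.Chars.strip (PySem.Chars.lower title.toList)
  let result := name.foldl (fun acc ch =>
    if PySem.Chars.isalnum ch then acc ++ [ch]
    else if acc ≠ [] ∧ acc.getLast? ≠ some '-' then acc ++ ['-'] else acc) ([] : List Char)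
  let cleaned := PySem.Chars.stripChars result ['-']
  let cleaned := if cleaned.length < 2 then
      (if cleaned ≠ [] then cleaned ++ "-api".toList else "unnamed-api".toList)
    else cleaned
  String.ofList cleaned

-- ===== PORT B =====
-- B's run extraction: the outer while-loop indices become structural recursion,
-- the inner `while j < n and name[j].isalnum()` / slice `name[i:j]` becomes takeWhile/dropWhile.
def altRuns (cs : List Char) : List (List Char) :=
  match cs with
  | [] => []
  | c :: rest =>
    if PySem.Chars.isalnum c then
      (c :: rest.takeWhile PySem.Chars.isalnum) :: altRuns (rest.dropWhile PySem.Chars.isalnum)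
    else altRuns rest
termination_by cs.length
decreasing_by
  · simpa using Nat.lt_succ_of_le (List.length_dropWhile_le _ _)
  · simp

def title_to_name_py_alt (title : String) : String :=
  let cleaned := PySem.Chars.join ['-'] (altRuns (PySem.Chars.lower title.toList))
  let cleaned := if cleaned.length < 2 then
      (if cleaned ≠ [] then cleaned ++ "-api".toList else "unnamed-api".toList)
    else cleaned
  String.ofList cleaned

-- ===== PRECONDITION & SPEC =====
def Spec_title_to_name_py (title : String) (out : String) : Prop := out = title_to_name_py_alt title
instance (title : String) (out : String) : Decidable (Spec_title_to_name_py title out) := by unfold Spec_title_to_name_py; infer_instance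

-- ===== CLAIM (what is proved, stated in full; the proofs are below) =====
def Claim_equal_title_to_name_py : Prop := ∀ (title : String), Dom_title_to_name_py title → Spec_title_to_name_py title (title_to_name_py title)

-- ===== LEMMAS AND PROOFS =====

-- Character facts
theorem pv_space_not_alnum (c : Char) (h : PySem.Chars.isspace c = true) :
    PySem.Chars.isalnum c = false := by
  have hA : 'A'.val.toNat = 65 := rfl
  have hZ : 'Z'.val.toNat = 90 := rfl
  have ha : 'a'.val.toNat = 97 := rfl
  have hz : 'z'.val.toNat = 122 := rfl
  have h0 : '0'.val.toNat = 48 := rfl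
  have h9 : '9'.val.toNat = 57 := rfl
  simp only [PySem.Chars.isspace, PySem.Chars.isalnum, PySem.Chars.isalpha, PySem.Chars.isdigit,
    PySem.Chars.isupper, PySem.Chars.islower, Char.le_def, Char.toNat, UInt32.le_iff_toNat_le,
    Bool.or_eq_true, Bool.and_eq_true, decide_eq_true_eq, Bool.or_eq_false_iff,
    Bool.and_eq_false_iff, decide_eq_false_iff_not, hA, hZ, ha, hz, h0, h9] at *
  omega

theorem pv_alnum_ne_dash (c : Char) (h : PySem.Chars.isalnum c = true) : c ≠ '-' := by
  rintro rfl
  exact absurd h (by decide)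

-- A's loop, with the accumulator summarised by the flag "last emitted char is not '-'"
def aloop : List Char → Bool → List Char
  | [], _ => []
  | c :: cs, b =>
    if PySem.Chars.isalnum c then c :: aloop cs true
    else if b then '-' :: aloop cs false
    else aloop cs false

def aflag (acc : List Char) : Bool :=
  match acc.getLast? with
  | none => false
  | some c => c != '-'

theorem pv_foldl_eq_aloop (cs : List Char) (acc : List Char) :
    cs.foldl (fun acc ch =>
      if PySem.Chars.isalnum ch then acc ++ [ch]
      else if acc ≠ [] ∧ acc.getLast? ≠ some '-' then acc ++ ['-'] else acc) acc
    = acc ++ aloop cs (aflag acc) := by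
  induction cs generalizing acc with
  | nil => simp [aloop]
  | cons c cs ih =>
    simp only [List.foldl_cons]
    by_cases hc : PySem.Chars.isalnum c = true
    · rw [if_pos hc, ih]
      have hflag : aflag (acc ++ [c]) = true := by
        simp [aflag, List.getLast?_append, pv_alnum_ne_dash c hc]
      rw [hflag, aloop, if_pos hc, List.append_assoc]
      rfl
    · rw [if_neg hc]
      cases hb : aflag acc with
      | true =>
        have hcond : acc ≠ [] ∧ acc.getLast? ≠ some '-' := by
          unfold aflag at hb
          rcases hl : acc.getLast? with _ | d
          · rw [hl] at hb; simp at hb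
          · rw [hl] at hb
            refine ⟨?_, by simpa [hl] using (bne_iff_ne.mp hb)⟩
            rintro rfl; simp at hl
        rw [if_pos hcond, ih]
        have hflag : aflag (acc ++ ['-']) = false := by
          simp [aflag, List.getLast?_append]
        rw [hflag, aloop, if_neg hc, if_pos rfl, List.append_assoc]
        rfl
      | false =>
        have hcond : ¬ (acc ≠ [] ∧ acc.getLast? ≠ some '-') := by
          unfold aflag at hb
          rcases hl : acc.getLast? with _ | d
          · have : acc = [] := by simpa using hl
            simp [this]
          · have hd : d = '-' := by
              rw [hl] at hb; simpa using hb
            rintro ⟨_, h2⟩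
            exact h2 (by rw [hd])
        rw [if_neg hcond, ih, aloop, if_neg hc, if_neg (by simp), hb]

-- aloop in "true" state consumes the current run, then emits one '-' (if anything follows)
theorem pv_aloop_true (cs : List Char) :
    aloop cs true = cs.takeWhile PySem.Chars.isalnum ++
      (if (cs.dropWhile PySem.Chars.isalnum).isEmpty then []
       else '-' :: aloop (cs.dropWhile PySem.Chars.isalnum).tail false) := by
  induction cs with
  | nil => simp [aloop]
  | cons c cs ih =>
    by_cases hc : PySem.Chars.isalnum c = true
    · rw [aloop, if_pos hc, ih, List.takeWhile_cons_of_pos hc, List.dropWhile_cons_of_pos hc]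
      rfl
    · rw [aloop, if_neg hc, if_pos rfl,
        List.takeWhile_cons_of_neg (by simpa using hc), List.dropWhile_cons_of_neg (by simpa using hc)]
      simp

-- no alnum char ⇒ no runs
theorem pv_altRuns_nil (cs : List Char) (h : ∀ c ∈ cs, PySem.Chars.isalnum c = false) :
    altRuns cs = [] := by
  induction cs with
  | nil => rw [altRuns]
  | cons c cs ih =>
    rw [altRuns]
    rw [if_neg (by simp [h c (by simp)])]
    exact ih (fun x hx => h x (by simp [hx]))

theorem pv_altRuns_nil_of_not_any (cs : List Char) (h : cs.any PySem.Chars.isalnum = false) :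
    altRuns cs = [] :=
  pv_altRuns_nil cs (by simpa [List.any_eq_false] using h)

-- whether a trailing '-' is emitted
def tdash (ds : List Char) : Bool :=
  ds.any PySem.Chars.isalnum &&
    !(match ds.getLast? with
      | none => false
      | some c => PySem.Chars.isalnum c)

-- altRuns is empty iff there is no alphanumeric character
theorem pv_altRuns_eq_nil_iff (cs : List Char) :
    altRuns cs = [] ↔ ∀ c ∈ cs, PySem.Chars.isalnum c = false := by
  constructor
  · intro h
    induction cs with
    | nil => simp
    | cons c rest ih =>
      rw [altRuns] at h
      by_cases hc : PySem.Chars.isalnum c = true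
      · rw [if_pos hc] at h; exact absurd h (by simp)
      · rw [if_neg hc] at h
        intro x hx
        rcases List.mem_cons.mp hx with rfl | hx
        · simpa using hc
        · exact ih h x hx
  · exact pv_altRuns_nil cs

theorem pv_any_of_altRuns_ne_nil (cs : List Char) (h : altRuns cs ≠ []) :
    cs.any PySem.Chars.isalnum = true := by
  by_contra hfalse
  exact h (pv_altRuns_nil_of_not_any cs (by simpa using hfalse))

theorem pv_tdash_cons (c : Char) (rest : List Char) (hc : PySem.Chars.isalnum c = false) :
    tdash (c :: rest) = tdash rest := by
  cases rest with
  | nil => simp [tdash, hc]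
  | cons r rs => simp [tdash, hc, List.getLast?_cons_cons]

-- main characterisation of A's loop by B's runs
theorem pv_aloop_eq_runs_aux (n : ℕ) : ∀ ds : List Char, ds.length ≤ n →
    aloop ds false = PySem.Chars.join ['-'] (altRuns ds) ++ (if tdash ds then ['-'] else []) := by
  induction n with
  | zero =>
    intro ds h
    have hds : ds = [] := by cases ds <;> simp_all
    subst hds
    simp [aloop, altRuns, tdash, PySem.Chars.join_nil]
  | succ n ih =>
    intro ds h
    match ds with
    | [] => simp [aloop, altRuns, tdash, PySem.Chars.join_nil]
    | c :: rest =>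
      by_cases hc : PySem.Chars.isalnum c = true
      · -- a run starts at c
        have hlen : rest.length ≤ n := by simpa using h
        rw [aloop, if_pos hc, pv_aloop_true, altRuns, if_pos hc]
        cases hdw : rest.dropWhile PySem.Chars.isalnum with
        | nil =>
          -- everything after c is alphanumeric: single run, no trailing dash
          have hall : ∀ x ∈ rest, PySem.Chars.isalnum x = true :=
            List.dropWhile_eq_nil_iff.mp hdw
          have htw : rest.takeWhile PySem.Chars.isalnum = rest := by
            have := List.takeWhile_append_dropWhile (p := PySem.Chars.isalnum) (l := rest)
            rw [hdw] at this; simpa using this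
          have htd : tdash (c :: rest) = false := by
            have hne : (c :: rest) ≠ [] := by simp
            have hmem := List.getLast_mem hne
            have hlast : PySem.Chars.isalnum ((c :: rest).getLast hne) = true := by
              rcases List.mem_cons.mp hmem with heq | hmem2
              · rw [heq]; exact hc
              · exact hall _ hmem2
            have hsome : (c :: rest).getLast? = some ((c :: rest).getLast hne) :=
              (List.getLast?_eq_getLast hne)
            simp [tdash, hsome, hlast]
          rw [htd, show altRuns ([] : List Char) = [] from by rw [altRuns],
            PySem.Chars.join_singleton]
          simp
        | cons d rest2 =>
          have hd : PySem.Chars.isalnum d = false := by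
            have hne : rest.dropWhile PySem.Chars.isalnum ≠ [] := by simp [hdw]
            have := List.head_dropWhile_not (p := PySem.Chars.isalnum) (l := rest) hne
            simpa [hdw] using this
          have hsplit : rest = rest.takeWhile PySem.Chars.isalnum ++ d :: rest2 := by
            conv_lhs => rw [← List.takeWhile_append_dropWhile (p := PySem.Chars.isalnum) (l := rest)]
            rw [hdw]
          have hlen2 : rest2.length ≤ n := by
            have h1 : (rest.dropWhile PySem.Chars.isalnum).length ≤ rest.length :=
              List.length_dropWhile_le _ _
            rw [hdw] at h1; simp at h1; omega
          have hih := ih rest2 hlen2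
          have haltdw : altRuns (d :: rest2) = altRuns rest2 := by
            rw [altRuns, if_neg (by simp [hd])]
          have hlastCR : (c :: rest).getLast? = (d :: rest2).getLast? := by
            have : (c :: rest) = (c :: rest.takeWhile PySem.Chars.isalnum) ++ (d :: rest2) := by
              rw [List.cons_append, ← hsplit]
            rw [this, List.getLast?_append]
            obtain ⟨x, hx⟩ : ∃ x, (d :: rest2).getLast? = some x :=
              ⟨(d :: rest2).getLast (by simp), List.getLast?_eq_some_getLast (by simp)⟩
            rw [hx]
            rfl
          simp only [List.isEmpty_cons, List.tail_cons, Bool.false_eq_true, if_false]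
          rw [hih, haltdw]
          cases har : altRuns rest2 with
          | nil =>
            have hnone : ∀ x ∈ rest2, PySem.Chars.isalnum x = false :=
              (pv_altRuns_eq_nil_iff rest2).mp har
            have htd2 : tdash rest2 = false := by
              simp only [tdash, Bool.and_eq_false_iff]
              left
              exact List.any_eq_false.mpr (by simpa using hnone)
            have htd : tdash (c :: rest) = true := by
              have hany : (c :: rest).any PySem.Chars.isalnum = true := by
                simp [hc]
              have hne : (d :: rest2) ≠ [] := by simp
              have hmem := List.getLast_mem hne
              have hlast : PySem.Chars.isalnum ((d :: rest2).getLast hne) = false := by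
                rcases List.mem_cons.mp hmem with heq | hmem2
                · rw [heq]; exact hd
                · exact hnone _ hmem2
              have hsome : (c :: rest).getLast? = some ((d :: rest2).getLast hne) := by
                rw [hlastCR]; exact List.getLast?_eq_getLast hne
              simp [tdash, hany, hsome, hlast]
            rw [htd, htd2, PySem.Chars.join_nil, PySem.Chars.join_singleton]
            simp
          | cons r0 rs0 =>
            have hany2 : rest2.any PySem.Chars.isalnum = true :=
              pv_any_of_altRuns_ne_nil rest2 (by simp [har])
            have hne2 : rest2 ≠ [] := by
              rintro rfl; simp at hany2
            have htd : tdash (c :: rest) = tdash rest2 := by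
              have hany : (c :: rest).any PySem.Chars.isalnum = true := by simp [hc]
              have hlast2 : (d :: rest2).getLast? = rest2.getLast? := by
                rcases rest2 with _ | ⟨y, ys⟩
                · exact absurd rfl hne2
                · exact List.getLast?_cons_cons
              simp only [tdash, hany, hany2, Bool.true_and]
              rw [hlastCR, hlast2]
            rw [htd, PySem.Chars.join_cons_cons]
            simp
      · -- c is skipped by both sides
        have hc' : PySem.Chars.isalnum c = false := by simpa using hc
        have hlen : rest.length ≤ n := by simpa using h
        rw [aloop, if_neg hc, if_neg (by simp), ih rest hlen, altRuns, if_neg hc,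
          pv_tdash_cons c rest hc']

theorem pv_aloop_eq_runs (ds : List Char) :
    aloop ds false = PySem.Chars.join ['-'] (altRuns ds) ++ (if tdash ds then ['-'] else []) :=
  pv_aloop_eq_runs_aux ds.length ds le_rfl

-- every run is nonempty and all-alphanumeric
theorem pv_altRuns_all_aux (n : ℕ) : ∀ cs : List Char, cs.length ≤ n →
    ∀ r ∈ altRuns cs, r ≠ [] ∧ ∀ x ∈ r, PySem.Chars.isalnum x = true := by
  induction n with
  | zero =>
    intro cs h
    have : cs = [] := by cases cs <;> simp_all
    subst this
    simp [altRuns]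
  | succ n ih =>
    intro cs h r hr
    match cs with
    | [] => simp [altRuns] at hr
    | c :: rest =>
      by_cases hc : PySem.Chars.isalnum c = true
      · rw [altRuns, if_pos hc] at hr
        rcases List.mem_cons.mp hr with rfl | hr2
        · refine ⟨by simp, ?_⟩
          intro x hx
          rcases List.mem_cons.mp hx with rfl | hx2
          · exact hc
          · exact List.mem_takeWhile_imp hx2
        · have hlen2 : (rest.dropWhile PySem.Chars.isalnum).length ≤ n := by
            have := List.length_dropWhile_le (p := PySem.Chars.isalnum) rest
            simp at h; omega
          exact ih _ hlen2 r hr2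
      · rw [altRuns, if_neg hc] at hr
        exact ih rest (by simpa using h) r hr

-- head and last of the joined runs are alphanumeric (so never '-')
theorem pv_join_ends (rs : List (List Char))
    (hall : ∀ r ∈ rs, r ≠ [] ∧ ∀ x ∈ r, PySem.Chars.isalnum x = true) :
    ((PySem.Chars.join ['-'] rs).head? ≠ some '-') ∧
    ((PySem.Chars.join ['-'] rs).getLast? ≠ some '-') ∧
    (rs ≠ [] → PySem.Chars.join ['-'] rs ≠ []) := by
  induction rs with
  | nil => simp [PySem.Chars.join_nil]
  | cons r rs ih =>
    obtain ⟨hrne, hralnum⟩ := hall r (by simp)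
    have hhead : r.head? = some '-' → False := by
      intro hh
      have : '-' ∈ r := by
        rcases r with _ | ⟨a, t⟩
        · simp at hh
        · simp at hh; simp [hh]
      exact pv_alnum_ne_dash '-' (hralnum '-' this) rfl
    have hlastr : r.getLast? ≠ some '-' := by
      intro hl
      have hmem : '-' ∈ r := by
        have hsome : r.getLast? = some (r.getLast hrne) := List.getLast?_eq_getLast hrne
        rw [hsome] at hl
        have : r.getLast hrne = '-' := by simpa using hl
        rw [← this]; exact List.getLast_mem hrne
      exact pv_alnum_ne_dash '-' (hralnum '-' hmem) rfl
    cases rs with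
    | nil =>
      rw [PySem.Chars.join_singleton]
      exact ⟨fun hh => hhead hh, hlastr, fun _ => hrne⟩
    | cons q qs =>
      obtain ⟨ihh, ihl, ihne⟩ := ih (fun x hx => hall x (by simp [hx]))
      have hjne : PySem.Chars.join ['-'] (q :: qs) ≠ [] := ihne (by simp)
      rw [PySem.Chars.join_cons_cons]
      refine ⟨?_, ?_, fun _ => by simp [hrne]⟩
      · rw [List.append_assoc, List.head?_append]
        rcases r with _ | ⟨a, t⟩
        · exact absurd rfl hrne
        · simpa using fun hh => hhead (by simpa using hh)
      · rw [List.append_assoc, List.getLast?_append, List.getLast?_append]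
        rcases hj : (PySem.Chars.join ['-'] (q :: qs)) with _ | ⟨b, u⟩
        · exact absurd hj hjne
        · rw [← hj]
          have : (PySem.Chars.join ['-'] (q :: qs)).getLast? ≠ none := by
            simp [List.getLast?_eq_none_iff, hjne]
          rcases ho : (PySem.Chars.join ['-'] (q :: qs)).getLast? with _ | x
          · exact absurd ho this
          · rw [ho] at ihl
            simpa using ihl

-- stripping '-' from a list with non-'-' ends plus an optional trailing dash is the identity
theorem pv_strip_ends (l dop : List Char) (hl : l ≠ []) (hh : l.head? ≠ some '-')
    (hg : l.getLast? ≠ some '-') (hdop : dop = [] ∨ dop = ['-']) :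
    PySem.Chars.stripChars (l ++ dop) ['-'] = l := by
  obtain ⟨a, t, rfl⟩ : ∃ a t, l = a :: t := by
    rcases l with _ | ⟨a, t⟩
    · exact absurd rfl hl
    · exact ⟨a, t, rfl⟩
  have hane : a ≠ '-' := by intro h; exact hh (by simp [h])
  have hpa : (['-'].contains a) = false := by simpa using hane
  show (List.dropWhile (fun c => (['-'].contains c))
      (List.dropWhile (fun c => (['-'].contains c)) ((a :: t) ++ dop)).reverse).reverse = a :: t
  have h1 : List.dropWhile (fun c => (['-'].contains c)) ((a :: t) ++ dop) = (a :: t) ++ dop := by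
    rw [List.cons_append, List.dropWhile_cons_of_neg (by simpa using hane)]
  rw [h1]
  obtain ⟨x, hx⟩ : ∃ x, (a :: t).getLast? = some x :=
    ⟨(a :: t).getLast (by simp), List.getLast?_eq_some_getLast (by simp)⟩
  have hxne : x ≠ '-' := fun h => hg (h ▸ hx)
  have hpx : (['-'].contains x) = false := by simpa using hxne
  have hrevh : (a :: t).reverse.head? = some x := by rw [List.head?_reverse]; exact hx
  obtain ⟨t', ht'⟩ : ∃ t', (a :: t).reverse = x :: t' := by
    rcases hr : (a :: t).reverse with _ | ⟨y, u⟩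
    · exact absurd hr (by simp)
    · rw [hr] at hrevh
      obtain rfl : y = x := by simpa using hrevh
      exact ⟨u, rfl⟩
  have hdropRev : List.dropWhile (fun c => (['-'].contains c)) (a :: t).reverse = (a :: t).reverse := by
    rw [ht', List.dropWhile_cons_of_neg (by simpa using hxne)]
  rcases hdop with rfl | rfl
  · rw [List.append_nil, hdropRev, List.reverse_reverse]
  · rw [List.reverse_append]
    have : (['-'] : List Char).reverse ++ (a :: t).reverse = '-' :: (a :: t).reverse := by simp
    rw [this, List.dropWhile_cons_of_pos (by simp), hdropRev,
      List.reverse_reverse]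

-- stripping '-' from the joined runs (plus the optional trailing dash) is the identity
theorem pv_stripChars_clean (ds : List Char) :
    PySem.Chars.stripChars
      (PySem.Chars.join ['-'] (altRuns ds) ++ (if tdash ds then ['-'] else [])) ['-']
      = PySem.Chars.join ['-'] (altRuns ds) := by
  have hall := pv_altRuns_all_aux ds.length ds le_rfl
  obtain ⟨hhead, hlast, hne⟩ := pv_join_ends (altRuns ds) hall
  rcases hrs : altRuns ds with _ | ⟨r, rs⟩
  · have hnone : ∀ c ∈ ds, PySem.Chars.isalnum c = false := (pv_altRuns_eq_nil_iff ds).mp hrs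
    have htd : tdash ds = false := by
      simp only [tdash, Bool.and_eq_false_iff]
      left
      exact List.any_eq_false.mpr (by simpa using hnone)
    rw [htd]
    simp [PySem.Chars.join_nil, PySem.Chars.stripChars]
  · rw [← hrs]
    exact pv_strip_ends _ _ (hne (by simp [hrs])) hhead hlast
      (by rcases tdash ds <;> simp)

-- whitespace stripping does not change the runs
theorem pv_runs_lstrip (cs : List Char) : altRuns (PySem.Chars.lstrip cs) = altRuns cs := by
  unfold PySem.Chars.lstrip
  induction cs with
  | nil => simp
  | cons c rest ih =>
    by_cases hs : PySem.Chars.isspace c = true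
    · rw [List.dropWhile_cons_of_pos hs, ih,
        show altRuns (c :: rest) = altRuns rest from by
          rw [altRuns, if_neg (by simp [pv_space_not_alnum c hs])]]
    · rw [List.dropWhile_cons_of_neg hs]

theorem pv_runs_append_spaces_aux (n : ℕ) : ∀ xs ys : List Char, xs.length ≤ n →
    (∀ c ∈ ys, PySem.Chars.isspace c = true) → altRuns (xs ++ ys) = altRuns xs := by
  induction n with
  | zero =>
    intro xs ys h hys
    have : xs = [] := by cases xs <;> simp_all
    subst this
    rw [List.nil_append, show altRuns ([] : List Char) = [] from by rw [altRuns]]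
    exact pv_altRuns_nil ys (fun c hc => pv_space_not_alnum c (hys c hc))
  | succ n ih =>
    intro xs ys h hys
    match xs with
    | [] =>
      rw [List.nil_append, show altRuns ([] : List Char) = [] from by rw [altRuns]]
      exact pv_altRuns_nil ys (fun c hc => pv_space_not_alnum c (hys c hc))
    | c :: xs' =>
      have hysdrop : List.dropWhile PySem.Chars.isalnum ys = ys := by
        rcases ys with _ | ⟨y, ys'⟩
        · rfl
        · exact List.dropWhile_cons_of_neg
            (by simp [pv_space_not_alnum y (hys y (by simp))])
      have hystake : List.takeWhile PySem.Chars.isalnum ys = [] := by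
        rcases ys with _ | ⟨y, ys'⟩
        · rfl
        · exact List.takeWhile_cons_of_neg
            (by simp [pv_space_not_alnum y (hys y (by simp))])
      have hysruns : altRuns ys = [] :=
        pv_altRuns_nil ys (fun x hx => pv_space_not_alnum x (hys x hx))
      by_cases hc : PySem.Chars.isalnum c = true
      · rw [List.cons_append, altRuns, if_pos hc, altRuns, if_pos hc,
          List.takeWhile_append, List.dropWhile_append]
        by_cases hall : List.dropWhile PySem.Chars.isalnum xs' = []
        · have htw : List.takeWhile PySem.Chars.isalnum xs' = xs' := by
            have := List.takeWhile_append_dropWhile (p := PySem.Chars.isalnum) (l := xs')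
            rw [hall] at this; simpa using this
          rw [if_pos (by rw [htw]), if_pos (by simp [hall]), hysdrop, hystake, hysruns,
            hall, show altRuns ([] : List Char) = [] from by rw [altRuns], htw]
          simp
        · have hlen : (List.takeWhile PySem.Chars.isalnum xs').length ≠ xs'.length := by
            have hsum := congrArg List.length
              (List.takeWhile_append_dropWhile (p := PySem.Chars.isalnum) (l := xs'))
            simp only [List.length_append] at hsum
            have : (List.dropWhile PySem.Chars.isalnum xs').length ≠ 0 := by
              simpa [List.length_eq_zero_iff] using hall
            omega
          have hlen2 : (List.dropWhile PySem.Chars.isalnum xs').length ≤ n := by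
            have := List.length_dropWhile_le (p := PySem.Chars.isalnum) xs'
            simp at h; omega
          rw [if_neg hlen, if_neg (by simpa [List.isEmpty_iff] using hall),
            ih _ ys hlen2 hys]
      · rw [List.cons_append, altRuns, if_neg hc, altRuns, if_neg hc]
        exact ih xs' ys (by simpa using h) hys

theorem pv_runs_rstrip (cs : List Char) : altRuns (PySem.Chars.rstrip cs) = altRuns cs := by
  unfold PySem.Chars.rstrip
  have hdecomp : cs = (List.dropWhile PySem.Chars.isspace cs.reverse).reverse ++
      (List.takeWhile PySem.Chars.isspace cs.reverse).reverse := by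
    conv_lhs => rw [← List.reverse_reverse cs,
      ← List.takeWhile_append_dropWhile (p := PySem.Chars.isspace) (l := cs.reverse)]
    rw [List.reverse_append]
  conv_rhs => rw [hdecomp]
  rw [pv_runs_append_spaces_aux
    (List.dropWhile PySem.Chars.isspace cs.reverse).reverse.length _ _ le_rfl
    (fun c hc => List.mem_takeWhile_imp (List.mem_reverse.mp hc))]

theorem pv_runs_strip (cs : List Char) : altRuns (PySem.Chars.strip cs) = altRuns cs := by
  unfold PySem.Chars.strip
  rw [pv_runs_rstrip, pv_runs_lstrip]

theorem pv_main : ∀ title : String, title_to_name_py title = title_to_name_py_alt title := by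
  intro title
  simp only [title_to_name_py, title_to_name_py_alt]
  rw [pv_foldl_eq_aloop]
  rw [show aflag ([] : List Char) = false from rfl, List.nil_append,
    pv_aloop_eq_runs, pv_stripChars_clean, pv_runs_strip]
-- ===== VERDICT (by name: the statement is the Claim_ definition above) =====
theorem title_to_name_py_spec : Claim_equal_title_to_name_py := by
  intro title _
  unfold Spec_title_to_name_py
  exact pv_main title
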